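-- pv_equiv track=rewrite | github.com/vadim-zyamalov/advent-of-code | 2017/day-10/part1.py | process_list
-- ===== SOURCE A (Python) =====
-- def process_list(length, list_seq, pos, skip):
--     LEN = len(list_seq)
--     end_pos = (pos + length - 1) % LEN
--     for i in range(length // 2):
--         list_seq[(pos + i) % LEN], list_seq[(end_pos - i) % LEN] = (
--             list_seq[(end_pos - i) % LEN],
--             list_seq[(pos + i) % LEN],
--         )
--     return list_seq, pos + length + skip, skip + 1
-- ===== SOURCE B (Python) =====
-- def process_list(length, list_seq, pos, skip):
--     LEN = len(list_seq)
--     idx = [(pos + i) % LEN for i in range(length)]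
--     vals = [list_seq[j] for j in idx]
--     for j, v in zip(idx, reversed(vals)):
--         list_seq[j] = v
--     return list_seq, pos + length + skip, skip + 1
-- ===== Notes on version B (the rewrite author's own statement) =====
-- stated objective: alternative
-- what changed: Replaces the in-place pairwise modular swap loop with a gather/reverse/scatter: build the list of target positions, read the current values there, write them back reversed; Pre_ excludes empty list_seq (A raises) and the unspecified corner length > len(list_seq), where the two equally defensible behaviours need not agree.
-- outside the precondition, e.g. on process_list(5, [0, 4, 5], 2, 0): A returns ([0, 4, 5], 7, 1), B returns ([5, 4, 0], 7, 1); on process_list(1, [], 0, 0): A raises ZeroDivisionError, B raises ZeroDivisionError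
import Mathlib
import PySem

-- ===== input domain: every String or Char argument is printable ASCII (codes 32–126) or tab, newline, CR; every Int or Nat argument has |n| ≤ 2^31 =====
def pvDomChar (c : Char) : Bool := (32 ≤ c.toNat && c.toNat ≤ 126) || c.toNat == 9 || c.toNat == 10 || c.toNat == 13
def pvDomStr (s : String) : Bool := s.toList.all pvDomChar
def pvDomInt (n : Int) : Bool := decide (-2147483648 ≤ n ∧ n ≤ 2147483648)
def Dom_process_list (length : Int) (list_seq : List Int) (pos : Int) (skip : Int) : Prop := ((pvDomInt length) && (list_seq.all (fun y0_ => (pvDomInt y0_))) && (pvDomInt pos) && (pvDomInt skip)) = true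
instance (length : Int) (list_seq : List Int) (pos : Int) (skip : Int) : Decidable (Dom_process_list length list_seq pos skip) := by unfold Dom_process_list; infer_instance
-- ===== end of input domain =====

-- B replaces A's in-place pairwise modular swap loop by a gather/reverse/scatter over an explicit index list
-- (same returned tuple; both Pythons mutate list_seq in place, the theorems are about the returned value).

-- ===== PORT A =====
-- pyGetD/pySetD are used where Python indexes: the indices are results of `% LEN`, hence in range whenever LEN > 0,
-- which Pre_ guarantees (LEN = 0 makes Python raise ZeroDivisionError at `% LEN` and is excluded by Pre_).
def process_list (length : Int) (list_seq : List Int) (pos : Int) (skip : Int) : List Int × Int × Int :=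
  let LEN : Int := list_seq.length
  let end_pos : Int := PySem.Int.mod (pos + length - 1) LEN
  let l := (PySem.List.pyRange 0 (PySem.Int.floordiv length 2) 1).foldl
    (fun ls i =>
      -- tuple assignment: both right-hand sides are read from ls, then the targets are written left to right
      let v1 := PySem.List.pyGetD ls (PySem.Int.mod (end_pos - i) LEN) 0
      let v2 := PySem.List.pyGetD ls (PySem.Int.mod (pos + i) LEN) 0
      PySem.List.pySetD (PySem.List.pySetD ls (PySem.Int.mod (pos + i) LEN) v1) (PySem.Int.mod (end_pos - i) LEN) v2)
    list_seq
  (l, pos + length + skip, skip + 1)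

-- ===== PORT B =====
def process_list_alt (length : Int) (list_seq : List Int) (pos : Int) (skip : Int) : List Int × Int × Int :=
  let LEN : Int := list_seq.length
  let idx := (PySem.List.pyRange 0 length 1).map (fun i => PySem.Int.mod (pos + i) LEN)
  let vals := idx.map (fun j => PySem.List.pyGetD list_seq j 0)
  let l := (idx.zip vals.reverse).foldl (fun ls jv => PySem.List.pySetD ls jv.1 jv.2) list_seq
  (l, pos + length + skip, skip + 1)

-- ===== PRECONDITION & SPEC =====
-- Pre_ excludes empty list_seq, where A raises ZeroDivisionError, and length > len(list_seq), an unspecified corner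
-- (no knot-hash caller passes a segment longer than the list) where A's overlapping modular swaps and B's
-- gather-scatter through repeated indices are two equally defensible behaviours that need not agree.
def Pre_process_list (length : Int) (list_seq : List Int) (pos : Int) (skip : Int) : Prop :=
  list_seq ≠ [] ∧ length ≤ (list_seq.length : Int)
instance (length : Int) (list_seq : List Int) (pos : Int) (skip : Int) : Decidable (Pre_process_list length list_seq pos skip) := by unfold Pre_process_list; infer_instance
def pvWitness_process_list : Int × List Int × Int × Int := (3, [1, 2, 3, 4, 5], 1, 2)

def Spec_process_list (length : Int) (list_seq : List Int) (pos : Int) (skip : Int) (out : List Int × Int × Int) : Prop := out = process_list_alt length list_seq pos skip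
instance (length : Int) (list_seq : List Int) (pos : Int) (skip : Int) (out : List Int × Int × Int) : Decidable (Spec_process_list length list_seq pos skip out) := by unfold Spec_process_list; infer_instance

-- ===== CLAIM (what is proved, stated in full; the proofs are below) =====
def Claim_equal_process_list : Prop := ∀ (length : Int) (list_seq : List Int) (pos : Int) (skip : Int), Dom_process_list length list_seq pos skip → Pre_process_list length list_seq pos skip → Spec_process_list length list_seq pos skip (process_list length list_seq pos skip)

-- ===== LEMMAS AND PROOFS =====

-- abstract loop bodies over Nat indices (proof-side only): (p + i) % n is position i of the reversed window
def gA (p L n : Nat) : List Int → Nat → List Int := fun ls k =>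
  (ls.set ((p + k) % n) (ls.getD ((p + (L - 1 - k)) % n) 0)).set ((p + (L - 1 - k)) % n) (ls.getD ((p + k) % n) 0)

def gB (orig : List Int) (p L n : Nat) : List Int → Nat → List Int := fun ls k =>
  ls.set ((p + k) % n) (orig.getD ((p + (L - 1 - k)) % n) 0)

lemma getD_set_self (l : List Int) (i : Nat) (v : Int) (h : i < l.length) : (l.set i v).getD i 0 = v := by
  simp [List.getD_eq_getElem?_getD, h]

lemma getD_set_ne (l : List Int) (i j : Nat) (v : Int) (hne : i ≠ j) : (l.set i v).getD j 0 = l.getD j 0 := by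
  simp [List.getD_eq_getElem?_getD, hne]

lemma f_inj (p n i j : Nat) (hi : i < n) (hj : j < n) (h : (p + i) % n = (p + j) % n) : i = j := by
  have h2 : i % n = j % n := Nat.ModEq.add_left_cancel' p h
  rwa [Nat.mod_eq_of_lt hi, Nat.mod_eq_of_lt hj] at h2

lemma Bchar (orig : List Int) (p L n : Nat) (hn : 0 < n) (hL : L ≤ n) (horig : orig.length = n) :
    ∀ k, k ≤ L →
      ((List.range k).foldl (gB orig p L n) orig).length = n
      ∧ (∀ i, i < L → ((List.range k).foldl (gB orig p L n) orig).getD ((p + i) % n) 0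
            = orig.getD ((p + (if i < k then L - 1 - i else i)) % n) 0)
      ∧ (∀ t, t < n → (∀ i, i < L → (p + i) % n ≠ t) →
            ((List.range k).foldl (gB orig p L n) orig).getD t 0 = orig.getD t 0) := by
  intro k
  induction k with
  | zero =>
    exact fun _ => ⟨by simpa using horig, fun i _ => by simp, fun t _ _ => by simp⟩
  | succ k ih =>
    intro hk1
    obtain ⟨ihlen, ih2, ih3⟩ := ih (by omega)
    rw [List.range_succ, List.foldl_append]
    simp only [List.foldl_cons, List.foldl_nil]
    refine ⟨by simp [gB, ihlen], ?_, ?_⟩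
    · intro i hi
      by_cases hik : i = k
      · subst hik
        rw [gB, getD_set_self _ _ _ (by rw [ihlen]; exact Nat.mod_lt _ hn)]
        rw [if_pos (by omega)]
      · have hne : (p + k) % n ≠ (p + i) % n := fun h =>
          hik (f_inj p n k i (by omega) (by omega) h).symm
        rw [gB, getD_set_ne _ _ _ _ hne, ih2 i hi]
        by_cases hik2 : i < k
        · rw [if_pos hik2, if_pos (by omega)]
        · rw [if_neg hik2, if_neg (by omega)]
    · intro t ht hun
      rw [gB, getD_set_ne _ _ _ _ (hun k (by omega)), ih3 t ht hun]

lemma Achar (orig : List Int) (p L n : Nat) (hn : 0 < n) (hL : L ≤ n) (horig : orig.length = n) :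
    ∀ k, k ≤ L / 2 →
      ((List.range k).foldl (gA p L n) orig).length = n
      ∧ (∀ i, i < L → ((List.range k).foldl (gA p L n) orig).getD ((p + i) % n) 0
            = orig.getD ((p + (if i < k ∨ L - k ≤ i then L - 1 - i else i)) % n) 0)
      ∧ (∀ t, t < n → (∀ i, i < L → (p + i) % n ≠ t) →
            ((List.range k).foldl (gA p L n) orig).getD t 0 = orig.getD t 0) := by
  intro k
  induction k with
  | zero =>
    refine fun _ => ⟨by simpa using horig, fun i hi => ?_, fun t _ _ => by simp⟩
    rw [if_neg (by omega)]
    simp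
  | succ k ih =>
    intro hk1
    have hkk : 2 * k + 2 ≤ L := by omega
    obtain ⟨ihlen, ih2, ih3⟩ := ih (by omega)
    rw [List.range_succ, List.foldl_append]
    simp only [List.foldl_cons, List.foldl_nil]
    set res := (List.range k).foldl (gA p L n) orig with hres
    have hkL : k < L := by omega
    have hmL : L - 1 - k < L := by omega
    have hfa : res.getD ((p + (L - 1 - k)) % n) 0 = orig.getD ((p + (L - 1 - k)) % n) 0 := by
      rw [ih2 _ hmL, if_neg (by omega)]
    have hfb : res.getD ((p + k) % n) 0 = orig.getD ((p + k) % n) 0 := by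
      rw [ih2 _ hkL, if_neg (by omega)]
    have hnefm : (p + (L - 1 - k)) % n ≠ (p + k) % n := fun h =>
      (by omega : L - 1 - k ≠ k) (f_inj p n (L - 1 - k) k (by omega) (by omega) h)
    refine ⟨by simp [gA, ihlen], ?_, ?_⟩
    · intro i hi
      by_cases hik : i = k
      · subst hik
        rw [gA, getD_set_ne _ _ _ _ hnefm,
          getD_set_self _ _ _ (by rw [ihlen]; exact Nat.mod_lt _ hn), hfa, if_pos (by omega)]
      · by_cases him : i = L - 1 - k
        · rw [gA, him, getD_set_self _ _ _ (by simp only [List.length_set, ihlen]; exact Nat.mod_lt _ hn),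
            hfb, if_pos (by omega)]
          congr 2
          omega
        · have hne1 : (p + k) % n ≠ (p + i) % n := fun h =>
            hik (f_inj p n k i (by omega) (by omega) h).symm
          have hne2 : (p + (L - 1 - k)) % n ≠ (p + i) % n := fun h =>
            him (f_inj p n (L - 1 - k) i (by omega) (by omega) h).symm
          rw [gA, getD_set_ne _ _ _ _ hne2, getD_set_ne _ _ _ _ hne1, ih2 i hi]
          by_cases hc : i < k ∨ L - k ≤ i
          · rw [if_pos hc, if_pos (by omega)]
          · rw [if_neg hc, if_neg (by omega)]
    · intro t ht hun
      rw [gA, getD_set_ne _ _ _ _ (hun _ hmL), getD_set_ne _ _ _ _ (hun k hkL), ih3 t ht hun]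

lemma range_reverse_eq (L : Nat) : (List.range L).reverse = (List.range L).map (fun k => L - 1 - k) := by
  apply List.ext_getElem
  · simp
  · intro t h1 h2
    simp only [List.length_reverse, List.length_range] at h1
    simp only [List.getElem_reverse, List.getElem_range, List.getElem_map, List.length_range]

lemma listsEq (orig : List Int) (p L n : Nat) (hn : 0 < n) (hL : L ≤ n) (horig : orig.length = n) :
    (List.range (L / 2)).foldl (gA p L n) orig = (List.range L).foldl (gB orig p L n) orig := by
  obtain ⟨alen, a2, a3⟩ := Achar orig p L n hn hL horig (L / 2) le_rfl
  obtain ⟨blen, b2, b3⟩ := Bchar orig p L n hn hL horig L le_rfl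
  apply List.ext_getElem (by rw [alen, blen])
  intro t h1 h2
  have ht : t < n := by rwa [alen] at h1
  rw [← List.getD_eq_getElem _ 0 h1, ← List.getD_eq_getElem _ 0 h2]
  by_cases hex : ∃ i, i < L ∧ (p + i) % n = t
  · obtain ⟨i, hi, hfi⟩ := hex
    rw [← hfi, a2 i hi, b2 i hi, if_pos hi]
    by_cases hc : i < L / 2 ∨ L - L / 2 ≤ i
    · rw [if_pos hc]
    · rw [if_neg hc]
      congr 2
      omega
  · push Not at hex
    rw [a3 t ht hex, b3 t ht hex]

-- ===== VERDICT (by name: the statement is the Claim_ definition above) =====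
theorem process_list_spec : Claim_equal_process_list := by
  intro length list_seq pos skip _ hpre
  obtain ⟨hne, hlen⟩ := hpre
  unfold Spec_process_list
  by_cases hneg : length < 0
  · have hA : PySem.List.pyRange 0 (PySem.Int.floordiv length 2) 1 = [] :=
      PySem.List.pyRange_one_eq_nil (by rw [PySem.Int.floordiv_eq_ediv_of_pos (by norm_num)]; omega)
    have hB : PySem.List.pyRange 0 length 1 = [] := PySem.List.pyRange_one_eq_nil (by omega)
    simp only [process_list, process_list_alt, hA, hB, List.map_nil, List.reverse_nil,
      List.zip_nil_right, List.foldl_nil]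
  · push Not at hneg
    have hn : 0 < list_seq.length := List.length_pos_of_ne_nil hne
    set n : Nat := list_seq.length with hndef
    set L : Nat := length.toNat with hLdef
    have hLeq : length = (L : Int) := (Int.toNat_of_nonneg hneg).symm
    have hLn : L ≤ n := by omega
    set p : Nat := (pos % (n : Int)).toNat with hpdef
    have hp : (p : Int) = pos % (n : Int) :=
      Int.toNat_of_nonneg (Int.emod_nonneg _ (by exact_mod_cast hn.ne'))
    have hmod : ∀ x : Int, PySem.Int.mod x (n : Int) = x % (n : Int) := fun x =>
      PySem.Int.mod_eq_emod_of_pos (by exact_mod_cast hn)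
    have modB' : ∀ k : Nat, (pos + (k : Int)) % (n : Int) = (((p + k) % n : Nat) : Int) := by
      intro k
      push_cast
      rw [hp]
      conv_lhs => rw [Int.add_emod]
      conv_rhs => rw [Int.add_emod, Int.emod_emod_of_dvd _ dvd_rfl]
    have modB : ∀ k : Nat, PySem.Int.mod (pos + (k : Int)) (n : Int) = (((p + k) % n : Nat) : Int) :=
      fun k => by rw [hmod]; exact modB' k
    have endB : ∀ k : Nat, k < L →
        PySem.Int.mod (PySem.Int.mod (pos + length - 1) (n : Int) - (k : Int)) (n : Int)
          = (((p + (L - 1 - k)) % n : Nat) : Int) := by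
      intro k hk
      rw [hmod, hmod]
      have h1 : ((pos + length - 1) % (n : Int) - (k : Int)) % (n : Int)
          = (pos + length - 1 - (k : Int)) % (n : Int) := by
        conv_lhs => rw [Int.sub_emod, Int.emod_emod_of_dvd _ dvd_rfl, ← Int.sub_emod]
      have h2 : pos + length - 1 - (k : Int) = pos + ((L - 1 - k : Nat) : Int) := by
        rw [hLeq]; omega
      rw [h1, h2]
      exact modB' (L - 1 - k)
    have hAfold : process_list length list_seq pos skip
        = ((List.range (L / 2)).foldl (gA p L n) list_seq, pos + length + skip, skip + 1) := by
      simp only [process_list]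
      have hflo : PySem.Int.floordiv length 2 = ((L / 2 : Nat) : Int) := by
        rw [hLeq]; exact_mod_cast PySem.Int.floordiv_natCast L 2
      rw [hflo, PySem.List.pyRange_zero_natCast, List.foldl_map]
      refine congrArg (fun x => (x, _, _)) ?_
      apply PySem.List.foldl_congr_mem
      intro acc k hk
      have hkL : k < L := by have := List.mem_range.mp hk; omega
      rw [modB k, endB k hkL]
      simp only [PySem.List.pyGetD_natCast, PySem.List.pySetD_natCast, gA]
    have hBfold : process_list_alt length list_seq pos skip
        = ((List.range L).foldl (gB list_seq p L n) list_seq, pos + length + skip, skip + 1) := by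
      simp only [process_list_alt]
      have hrange : PySem.List.pyRange 0 length 1 = (List.range L).map (fun k : Nat => (k : Int)) := by
        rw [hLeq]; exact PySem.List.pyRange_zero_natCast L
      rw [hrange, List.map_map]
      have hidx : (List.range L).map ((fun i => PySem.Int.mod (pos + i) ((list_seq.length : Nat) : Int)) ∘ (fun k : Nat => (k : Int)))
          = (List.range L).map (fun k : Nat => (((p + k) % n : Nat) : Int)) := by
        apply List.map_congr_left
        intro k _
        exact modB k
      rw [hidx, List.map_map]
      simp only [Function.comp_def, PySem.List.pyGetD_natCast]
      rw [← List.map_reverse, range_reverse_eq, List.map_map, List.zip_map', List.foldl_map]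
      refine congrArg (fun x => (x, _, _)) ?_
      apply PySem.List.foldl_congr_mem
      intro acc k _
      simp only [PySem.List.pySetD_natCast, Function.comp_def, gB]
    rw [hAfold, hBfold, listsEq list_seq p L n hn hLn rfl]
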